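-- pv_equiv track=rewrite | github.com/Raphailinc/package-comparison-tool | package_comparison_tool/version.py | _is_separators_only_or_zeros
-- ===== SOURCE A (Python) =====
-- def _is_separators_only_or_zeros(value: str, start: int) -> bool:
--     i = start
--     n = len(value)
--
--     while True:
--         while i < n and not value[i].isalnum() and value[i] not in "~^":
--             i += 1
--
--         if i >= n:
--             return True
--
--         if value[i] in "~^":
--             return False
--
--         if value[i].isdigit():
--             j = i
--             while j < n and value[j].isdigit():
--                 j += 1
--
--             if any(ch != "0" for ch in value[i:j]):
--                 return False
--
--             i = j
--             continue
--
--         return False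
-- ===== SOURCE B (Python) =====
-- def _is_separators_only_or_zeros(value: str, start: int) -> bool:
--     suffix = value[start:]
--     if '~' in suffix or '^' in suffix:
--         return False
--     return all(ch == '0' or not ch.isalnum() for ch in suffix)
-- ===== Notes on version B (the rewrite author's own statement) =====
-- stated objective: simpler
-- what changed: Replaces the index-based state machine (cursor loops that skip separators and scan digit runs) by slicing the suffix once and doing two plain passes: a '~'/'^' membership test, then an all() over per-character alnum-ness.
-- outside the precondition, e.g. on _is_separators_only_or_zeros('a0', -1): A returns False, B returns True
import Mathlib
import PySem

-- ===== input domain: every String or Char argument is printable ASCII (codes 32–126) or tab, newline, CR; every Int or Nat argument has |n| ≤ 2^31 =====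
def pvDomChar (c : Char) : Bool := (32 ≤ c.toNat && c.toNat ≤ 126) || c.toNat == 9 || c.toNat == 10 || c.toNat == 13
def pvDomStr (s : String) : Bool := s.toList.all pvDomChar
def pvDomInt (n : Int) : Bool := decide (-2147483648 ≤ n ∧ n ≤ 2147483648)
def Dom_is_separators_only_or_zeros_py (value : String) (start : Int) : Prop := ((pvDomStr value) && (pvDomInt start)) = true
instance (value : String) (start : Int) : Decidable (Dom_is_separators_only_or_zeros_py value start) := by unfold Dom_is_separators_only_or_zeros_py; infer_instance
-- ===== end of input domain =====

-- B replaces A's index-based state machine by one slice plus two plain passes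
-- (membership test for '~'/'^', then an all() over alnum-ness); objective: simpler.


-- ===== PORT A =====
-- inner loop: while i < n and not value[i].isalnum() and value[i] not in "~^": i += 1
def pvSkipSep (cs : List Char) (n i : Int) : Int :=
  if h : i < n then
    match PySem.List.pyGet? cs i with
    | some c =>
      if !(PySem.Chars.isalnum c) && !(c == '~') && !(c == '^') then
        pvSkipSep cs n (i + 1)
      else i
    | none => i
  else i
termination_by (n - i).toNat
decreasing_by omega

-- inner loop: while j < n and value[j].isdigit(): j += 1
def pvDigitEnd (cs : List Char) (n j : Int) : Int :=
  if h : j < n then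
    match PySem.List.pyGet? cs j with
    | some c => if PySem.Chars.isdigit c then pvDigitEnd cs n (j + 1) else j
    | none => j
  else j
termination_by (n - j).toNat
decreasing_by omega

theorem pvSkipSep_ge (cs : List Char) (n i : Int) : i ≤ pvSkipSep cs n i := by
  fun_induction pvSkipSep <;> omega

theorem pvDigitEnd_ge (cs : List Char) (n j : Int) : j ≤ pvDigitEnd cs n j := by
  fun_induction pvDigitEnd <;> omega

-- used by pvOuter's termination proof
theorem pvDigitEnd_gt (cs : List Char) (n i : Int) (c : Char)
    (h : i < n) (hc : PySem.List.pyGet? cs i = some c)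
    (hd : PySem.Chars.isdigit c = true) : i < pvDigitEnd cs n i := by
  rw [pvDigitEnd]
  simp only [h, dif_pos, hc, hd, if_pos]
  have := pvDigitEnd_ge cs n (i + 1)
  omega

-- outer `while True` loop of A
def pvOuter (cs : List Char) (n i : Int) : Bool :=
  let i' := pvSkipSep cs n i
  if _hge : n ≤ i' then true
  else
    match hc : PySem.List.pyGet? cs i' with
    | none => false  -- unreachable for 0 ≤ i' < n: Python would raise, index is in range here
    | some c =>
      if c == '~' || c == '^' then false
      else if hd : PySem.Chars.isdigit c = true then
        let j := pvDigitEnd cs n i'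
        if (PySem.List.slice cs (some i') (some j)).any (fun ch => !(ch == '0')) then
          false
        else pvOuter cs n j
      else false
termination_by (n - i).toNat
decreasing_by
  have h1 := pvSkipSep_ge cs n i
  have h2 := pvDigitEnd_gt cs n (pvSkipSep cs n i) c (by omega) hc hd
  omega

def is_separators_only_or_zeros_py (value : String) (start : Int) : Bool :=
  pvOuter value.toList (value.toList.length : Int) start

-- ===== PORT B =====
def is_separators_only_or_zeros_py_alt (value : String) (start : Int) : Bool :=
  let suffix := PySem.List.slice value.toList (some start) none
  if suffix.contains '~' || suffix.contains '^' then false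
  else suffix.all (fun ch => ch == '0' || !(PySem.Chars.isalnum ch))

-- ===== PRECONDITION & SPEC =====
-- Pre_ excludes negative start — an index position outside this internal scanner's natural
-- domain — where A's negative-index wraparound scans a wrapped-around region (and A raises
-- IndexError for start < -len(value)).
def Pre_is_separators_only_or_zeros_py (value : String) (start : Int) : Prop := 0 ≤ start
instance (value : String) (start : Int) : Decidable (Pre_is_separators_only_or_zeros_py value start) := by unfold Pre_is_separators_only_or_zeros_py; infer_instance

def pvWitness_is_separators_only_or_zeros_py : String × Int := ("0.0", 1)

def Spec_is_separators_only_or_zeros_py (value : String) (start : Int) (out : Bool) : Prop := out = is_separators_only_or_zeros_py_alt value start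
instance (value : String) (start : Int) (out : Bool) : Decidable (Spec_is_separators_only_or_zeros_py value start out) := by unfold Spec_is_separators_only_or_zeros_py; infer_instance

-- ===== CLAIM (what is proved, stated in full; the proofs are below) =====
def Claim_equal_is_separators_only_or_zeros_py : Prop := ∀ (value : String) (start : Int), Dom_is_separators_only_or_zeros_py value start → Pre_is_separators_only_or_zeros_py value start → Spec_is_separators_only_or_zeros_py value start (is_separators_only_or_zeros_py value start)

-- ===== LEMMAS AND PROOFS =====

-- a character the whole function accepts: not ~/^, and if alphanumeric then exactly '0'
def pvGood (c : Char) : Bool :=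
  !(c == '~') && !(c == '^') && (c == '0' || !(PySem.Chars.isalnum c))

theorem pvSkipSep_spec (cs : List Char) (i : Int) (h0 : 0 ≤ i) :
    ((cs.drop (pvSkipSep cs (cs.length : Int) i).toNat).all pvGood
        = (cs.drop i.toNat).all pvGood)
    ∧ (∀ c, PySem.List.pyGet? cs (pvSkipSep cs (cs.length : Int) i) = some c →
        (PySem.Chars.isalnum c || c == '~' || c == '^') = true) := by
  fun_induction pvSkipSep cs (cs.length : Int) i with
  | case1 i h c hc hcond ih =>
    obtain ⟨ih1, ih2⟩ := ih (by omega)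
    refine ⟨?_, ih2⟩
    rw [ih1]
    have hlt : i.toNat < cs.length := by omega
    have hcv : cs[i.toNat] = c := by
      rw [PySem.List.pyGet?_of_nonneg _ h0] at hc
      simpa [hlt] using hc
    have hdrop : cs.drop i.toNat = cs[i.toNat] :: cs.drop (i.toNat + 1) :=
      List.drop_eq_getElem_cons hlt
    have ht : (i + 1).toNat = i.toNat + 1 := by omega
    rw [ht, hdrop, List.all_cons, hcv]
    simp only [Bool.and_eq_true, Bool.not_eq_true'] at hcond
    simp [pvGood, hcond.1.2, hcond.2, hcond.1.1]
  | case2 i h c hc hcond =>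
    refine ⟨rfl, ?_⟩
    intro c' hc'
    rw [hc] at hc'
    injection hc' with hcc
    subst hcc
    simp only [Bool.and_eq_true, Bool.not_eq_true'] at hcond
    by_contra hx
    apply hcond
    simp only [Bool.or_eq_true] at hx
    push Not at hx
    simp_all
  | case3 i h hc =>
    refine ⟨rfl, ?_⟩
    intro c' hc'
    rw [hc] at hc'
    exact absurd hc' (by simp)
  | case4 i h =>
    refine ⟨rfl, ?_⟩
    intro c' hc'
    have : PySem.List.pyGet? cs i = none := by
      rw [PySem.List.pyGet?_eq_none_iff]
      unfold PySem.Raise.InRange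
      omega
    rw [this] at hc'
    exact absurd hc' (by simp)

theorem pvDigitEnd_spec (cs : List Char) (i : Int) (h0 : 0 ≤ i) :
    (((cs.drop i.toNat).take ((pvDigitEnd cs (cs.length : Int) i).toNat - i.toNat)).all
        PySem.Chars.isdigit = true)
    ∧ (∀ c, PySem.List.pyGet? cs (pvDigitEnd cs (cs.length : Int) i) = some c →
        PySem.Chars.isdigit c = false) := by
  fun_induction pvDigitEnd cs (cs.length : Int) i with
  | case1 i h c hc hd ih =>
    obtain ⟨ih1, ih2⟩ := ih (by omega)
    refine ⟨?_, ih2⟩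
    have hge := pvDigitEnd_ge cs (cs.length : Int) (i + 1)
    have hlt : i.toNat < cs.length := by omega
    have hcv : cs[i.toNat] = c := by
      rw [PySem.List.pyGet?_of_nonneg _ h0] at hc
      simpa [hlt] using hc
    have hdrop : cs.drop i.toNat = cs[i.toNat] :: cs.drop (i.toNat + 1) :=
      List.drop_eq_getElem_cons hlt
    have hm : (pvDigitEnd cs (cs.length : Int) (i + 1)).toNat - i.toNat
        = ((pvDigitEnd cs (cs.length : Int) (i + 1)).toNat - (i + 1).toNat) + 1 := by
      omega
    have ht : (i + 1).toNat = i.toNat + 1 := by omega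
    rw [hm, hdrop, List.take_succ_cons, ← ht, List.all_cons, hcv, hd]
    simpa using ih1
  | case2 i h c hc hd =>
    refine ⟨by simp, ?_⟩
    intro c' hc'
    rw [hc] at hc'
    injection hc' with hcc
    subst hcc
    exact Bool.eq_false_iff.mpr hd
  | case3 i h hc =>
    refine ⟨by simp, ?_⟩
    intro c' hc'
    rw [hc] at hc'
    exact absurd hc' (by simp)
  | case4 i h =>
    refine ⟨by simp, ?_⟩
    intro c' hc'
    have : PySem.List.pyGet? cs i = none := by
      rw [PySem.List.pyGet?_eq_none_iff]
      unfold PySem.Raise.InRange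
      omega
    rw [this] at hc'
    exact absurd hc' (by simp)

theorem pvOuter_eq (cs : List Char) (k : Nat) :
    ∀ i : Int, 0 ≤ i → (((cs.length : Int) - i).toNat ≤ k) →
      pvOuter cs (cs.length : Int) i = (cs.drop i.toNat).all pvGood := by
  induction k with
  | zero =>
    intro i h0 hk
    have hge : (cs.length : Int) ≤ i := by omega
    have hskip : pvSkipSep cs (cs.length : Int) i = i := by
      rw [pvSkipSep]
      simp [show ¬ (i < (cs.length : Int)) by omega]
    rw [pvOuter]
    simp only [hskip]
    rw [dif_pos hge]
    have : cs.drop i.toNat = [] := List.drop_eq_nil_of_le (by omega)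
    simp [this]
  | succ k ih =>
    intro i h0 hk
    obtain ⟨hall, hstop⟩ := pvSkipSep_spec cs i h0
    have hge0 := pvSkipSep_ge cs (cs.length : Int) i
    set i' := pvSkipSep cs (cs.length : Int) i with hi'
    clear_value i'
    have h0' : 0 ≤ i' := by omega
    rw [pvOuter, ← hall]
    simp only [← hi']
    by_cases hge : (cs.length : Int) ≤ i'
    · rw [dif_pos hge]
      have : cs.drop i'.toNat = [] := List.drop_eq_nil_of_le (by omega)
      simp [this]
    · rw [dif_neg hge]
      have hlt : i'.toNat < cs.length := by omega
      have hc : PySem.List.pyGet? cs i' = some cs[i'.toNat] := by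
        rw [PySem.List.pyGet?_of_nonneg _ h0']
        simp [hlt]
      have hdrop : cs.drop i'.toNat = cs[i'.toNat] :: cs.drop (i'.toNat + 1) :=
        List.drop_eq_getElem_cons hlt
      split
      · -- pyGet? cs i' = none : impossible here
        next heq => rw [← hi'] at heq; rw [hc] at heq; exact absurd heq (by simp)
      · next c heq =>
        rw [← hi'] at heq
        rw [hc] at heq
        injection heq with hcc
        subst hcc
        set c := cs[i'.toNat] with hcv
        clear_value c
        by_cases hts : (c == '~' || c == '^') = true
        · rw [if_pos hts, hdrop, List.all_cons]
          have : pvGood c = false := by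
            rcases Bool.or_eq_true_iff.mp hts with h | h
            · simp [pvGood, h]
            · simp [pvGood, h]
          simp [this]
        · rw [if_neg hts]
          have hstopc := hstop c hc
          by_cases hd : PySem.Chars.isdigit c = true
          · rw [dif_pos hd]
            obtain ⟨hdall, hdstop⟩ := pvDigitEnd_spec cs i' h0'
            have hjgt : i' < pvDigitEnd cs (cs.length : Int) i' :=
              pvDigitEnd_gt cs (cs.length : Int) i' c (by omega) hc hd
            set j := pvDigitEnd cs (cs.length : Int) i' with hj
            clear_value j
            have h0j : 0 ≤ j := by omega
            have hslice : PySem.List.slice cs (some i') (some j)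
                = (cs.drop i'.toNat).take (j.toNat - i'.toNat) :=
              PySem.List.slice_toNat cs h0' h0j
            have hsplit : cs.drop i'.toNat
                = (cs.drop i'.toNat).take (j.toNat - i'.toNat) ++ cs.drop j.toNat := by
              conv_lhs => rw [← List.take_append_drop (j.toNat - i'.toNat) (cs.drop i'.toNat)]
              rw [List.drop_drop]
              have hjj : i'.toNat + (j.toNat - i'.toNat) = j.toNat := by omega
              rw [hjj]
            by_cases hany : ((cs.drop i'.toNat).take (j.toNat - i'.toNat)).any
                (fun ch => !(ch == '0')) = true
            · rw [hslice, if_pos hany]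
              obtain ⟨d, hdmem, hdne⟩ := List.any_eq_true.mp hany
              have hdd : PySem.Chars.isdigit d = true :=
                List.all_eq_true.mp hdall d hdmem
              have hgd : pvGood d = false := by
                have halnum : PySem.Chars.isalnum d = true := by
                  simp [PySem.Chars.isalnum, hdd]
                simp only [Bool.not_eq_true'] at hdne
                simp [pvGood, halnum, hdne]
              rw [hsplit, List.all_append]
              have : ((cs.drop i'.toNat).take (j.toNat - i'.toNat)).all pvGood = false :=
                List.all_eq_false.mpr ⟨d, hdmem, by simp [hgd]⟩
              simp [this]
            · rw [hslice, if_neg hany]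
              have hrec : pvOuter cs (cs.length : Int) j = (cs.drop j.toNat).all pvGood := by
                apply ih j h0j
                omega
              rw [hrec, hsplit, List.all_append]
              have htake : ((cs.drop i'.toNat).take (j.toNat - i'.toNat)).all pvGood = true := by
                rw [List.all_eq_true]
                intro d hdmem
                have hne : ¬ (!(d == '0')) = true := by
                  intro hcon
                  exact hany (List.any_eq_true.mpr ⟨d, hdmem, hcon⟩)
                simp only [Bool.not_eq_true', Bool.not_eq_false] at hne
                have hd0 : d = '0' := by simpa using hne
                subst hd0
                decide
              simp [htake]
          · rw [dif_neg hd]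
            have halnum : PySem.Chars.isalnum c = true := by
              simp only [Bool.or_eq_true, beq_iff_eq] at hstopc hts
              rcases hstopc with (h | h) | h
              · exact h
              · exact absurd (Or.inl h) hts
              · exact absurd (Or.inr h) hts
            have hne0 : (c == '0') = false := by
              have hdf : PySem.Chars.isdigit c = false := Bool.eq_false_iff.mpr hd
              by_contra hcon
              simp only [Bool.not_eq_false, beq_iff_eq] at hcon
              rw [hcon] at hdf
              simp [PySem.Chars.isdigit] at hdf
            have hgc : pvGood c = false := by simp [pvGood, halnum, hne0]
            rw [hdrop, List.all_cons]
            simp [hgc]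

theorem pvAlt_eq (l : List Char) :
    (if l.contains '~' || l.contains '^' then false
      else l.all (fun ch => ch == '0' || !(PySem.Chars.isalnum ch))) = l.all pvGood := by
  by_cases ht : l.contains '~' = true
  · have hm : '~' ∈ l := by simpa using ht
    have hall : l.all pvGood = false := List.all_eq_false.mpr ⟨'~', hm, by decide⟩
    have hcond : (l.contains '~' || l.contains '^') = true := by rw [ht, Bool.true_or]
    rw [if_pos hcond, hall]
  · by_cases hh : l.contains '^' = true
    · have hm : '^' ∈ l := by simpa using hh
      have hall : l.all pvGood = false := List.all_eq_false.mpr ⟨'^', hm, by decide⟩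
      have hcond : (l.contains '~' || l.contains '^') = true := by rw [hh, Bool.or_true]
      rw [if_pos hcond, hall]
    · simp only [Bool.not_eq_true] at ht hh
      rw [ht, hh]
      simp only [Bool.or_self, if_neg Bool.false_ne_true]
      have hnt : '~' ∉ l := by simpa using ht
      have hnh : '^' ∉ l := by simpa using hh
      rcases Bool.eq_false_or_eq_true (l.all pvGood) with hg | hg
      · rw [hg]
        apply List.all_eq_true.mpr
        intro d hdmem
        have := List.all_eq_true.mp hg d hdmem
        simp only [pvGood, Bool.and_eq_true] at this
        simpa using this.2
      · rw [hg]
        obtain ⟨d, hdmem, hdg⟩ := List.all_eq_false.mp hg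
        apply List.all_eq_false.mpr
        refine ⟨d, hdmem, ?_⟩
        have hd1 : (d == '~') = false := by
          simp only [beq_eq_false_iff_ne, ne_eq]
          intro h; subst h; exact hnt hdmem
        have hd2 : (d == '^') = false := by
          simp only [beq_eq_false_iff_ne, ne_eq]
          intro h; subst h; exact hnh hdmem
        simp only [pvGood, hd1, hd2, Bool.not_false, Bool.true_and] at hdg
        simpa using hdg

-- ===== VERDICT (by name: the statement is the Claim_ definition above) =====
theorem is_separators_only_or_zeros_py_spec : Claim_equal_is_separators_only_or_zeros_py := by
  intro value start _hD hPre
  unfold Spec_is_separators_only_or_zeros_py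
  unfold Pre_is_separators_only_or_zeros_py at hPre
  unfold is_separators_only_or_zeros_py is_separators_only_or_zeros_py_alt
  rw [pvOuter_eq value.toList ((value.toList.length : Int) - start).toNat start hPre (le_refl _)]
  rw [PySem.List.slice_from _ hPre, pvAlt_eq]
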